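-- pv_equiv track=rewrite | github.com/GSYBD/SXLNLP | 曹哲鸣/week4/homework.py | CutAll
-- ===== SOURCE A (Python) =====
-- def CutAll(sentence, dict, max_length):
--     target = []
--     if len(sentence) == 0:
--         return []
--     for i in range(1, len(sentence) + 1):
--         if i > max_length:
--             break
--         words = sentence[:i]
--         if words in dict:
--             cut_results = CutAll(sentence[i:], dict, max_length)
--             if len(cut_results):
--                 for cut_result in cut_results:
--                     target.append([words] + cut_result)
--             else:
--                 target.append([words])
--     return target
-- ===== SOURCE B (Python) =====
-- def CutAll(sentence, dict, max_length):
--     # Bottom-up DP: res[j] holds the segmentations of sentence[j:], computed once per suffix,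
--     # scanning only up to the longest dictionary word.
--     n = len(sentence)
--     longest = max(map(len, dict), default=0)
--     res = [[] for _ in range(n + 1)]
--     for j in range(n - 1, -1, -1):
--         target = []
--         limit = min(n - j, max_length, longest)
--         for i in range(1, limit + 1):
--             words = sentence[j:j + i]
--             if words in dict:
--                 sub = res[j + i]
--                 if sub:
--                     for r in sub:
--                         target.append([words] + r)
--                 else:
--                     target.append([words])
--         res[j] = target
--     return res[0]
-- ===== Notes on version B (the rewrite author's own statement) =====
-- stated objective: alternative
-- what changed: Replaces A's top-down recursion over suffixes with an iterative bottom-up dynamic program that fills a table res[j] of the segmentations of each suffix exactly once, scanning candidate words only up to the longest dictionary key (and removing Python recursion-depth limits).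
import Mathlib
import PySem

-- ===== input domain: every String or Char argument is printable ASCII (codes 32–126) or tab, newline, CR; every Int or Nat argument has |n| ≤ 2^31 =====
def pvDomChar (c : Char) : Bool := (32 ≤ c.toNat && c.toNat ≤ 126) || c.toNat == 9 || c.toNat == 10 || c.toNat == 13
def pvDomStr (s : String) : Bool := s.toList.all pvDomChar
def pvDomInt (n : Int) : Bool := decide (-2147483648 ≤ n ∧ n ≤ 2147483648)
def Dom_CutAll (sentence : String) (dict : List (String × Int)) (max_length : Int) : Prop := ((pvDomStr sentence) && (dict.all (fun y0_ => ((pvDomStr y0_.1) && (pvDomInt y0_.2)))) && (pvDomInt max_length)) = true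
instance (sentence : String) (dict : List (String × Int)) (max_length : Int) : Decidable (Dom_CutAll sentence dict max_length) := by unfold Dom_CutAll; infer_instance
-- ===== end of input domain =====

-- B replaces A's top-down recursion over suffixes with an iterative bottom-up DP table (alternative structure, same cost).

-- ===== PORT A =====
-- A, transliterated on the character list of the sentence. The for-loop with its 'break' is the fold over
-- range(1, len+1) cut off at the first i > max_length (takeWhile); the fuel counter only guards totality:
-- every recursive call drops at least one character, so fuel = length + 1 is never exhausted.
def CutAllFuel : Nat → List Char → List (String × Int) → Int → List (List String)
  | 0, _, _, _ => []
  | fuel + 1, cs, dict, ml =>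
    if cs.length = 0 then [] else
    ((List.range' 1 cs.length).takeWhile (fun (i : Nat) => decide ((i : Int) ≤ ml))).foldl
      (fun target i =>
        let words := String.mk (cs.take i)
        if dict.any (fun p => p.1 == words) then
          let rs := CutAllFuel fuel (cs.drop i) dict ml
          if rs.length ≠ 0 then target ++ rs.map (fun r => words :: r)
          else target ++ [[words]]
        else target) []

def CutAll (sentence : String) (dict : List (String × Int)) (max_length : Int) : List (List String) :=
  CutAllFuel (sentence.toList.length + 1) sentence.toList dict max_length

-- ===== PORT B =====
-- B's inner loop body (the step of the fold over i = 1 .. min(len, max_length)).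
def CutAllStep (cs : List Char) (tbl : List (List (List String))) (dict : List (String × Int))
    (target : List (List String)) (i : Nat) : List (List String) :=
  let words := String.mk (cs.take i)
  if dict.any (fun p => p.1 == words) then
    let sub := tbl.getD (i - 1) []
    if sub.length ≠ 0 then target ++ sub.map (fun r => words :: r)
    else target ++ [[words]]
  else target

-- longest = max(map(len, dict), default=0): the longest dictionary key (0 for an empty dict);
-- foldl max 0 is Python's max-with-default here since lengths are non-negative.
def CutAllLongest (dict : List (String × Int)) : Int :=
  (dict.map (fun p => (p.1.toList.length : Int))).foldl max 0

-- One row of B's table: the segmentations of the suffix cs, given the table tbl of the shorter suffixes;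
-- the scan stops at min(len(cs), max_length, longest).
def CutAllRow (cs : List Char) (tbl : List (List (List String))) (dict : List (String × Int))
    (ml : Int) (longest : Int) : List (List String) :=
  (List.range' 1 ((min (min ((cs.length : Int)) ml) longest).toNat)).foldl (CutAllStep cs tbl dict) []

-- B's table res, built back to front: entry j is the row for the suffix starting at j; the last entry ([]) is res[n].
def CutAllTbl (cs : List Char) (dict : List (String × Int)) (ml : Int) (longest : Int) : List (List (List String)) :=
  match cs with
  | [] => [[]]
  | c :: rest =>
    let tbl := CutAllTbl rest dict ml longest
    CutAllRow (c :: rest) tbl dict ml longest :: tbl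

def CutAll_alt (sentence : String) (dict : List (String × Int)) (max_length : Int) : List (List String) :=
  (CutAllTbl sentence.toList dict max_length (CutAllLongest dict)).headD []

-- ===== PRECONDITION & SPEC =====
def Spec_CutAll (sentence : String) (dict : List (String × Int)) (max_length : Int) (out : List (List String)) : Prop := out = CutAll_alt sentence dict max_length
instance (sentence : String) (dict : List (String × Int)) (max_length : Int) (out : List (List String)) : Decidable (Spec_CutAll sentence dict max_length out) := by unfold Spec_CutAll; infer_instance

-- ===== CLAIM (what is proved, stated in full; the proofs are below) =====
def Claim_equal_CutAll : Prop := ∀ (sentence : String) (dict : List (String × Int)) (max_length : Int), Dom_CutAll sentence dict max_length → Spec_CutAll sentence dict max_length (CutAll sentence dict max_length)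

-- ===== LEMMAS AND PROOFS =====

-- The break-at-i>ml prefix of [s, s+1, ...] is again a contiguous range.
lemma takeWhile_range'_le (ml : Int) :
    ∀ (n s : Nat), (List.range' s n).takeWhile (fun (i : Nat) => decide ((i : Int) ≤ ml))
      = List.range' s (min n ((ml - s + 1).toNat)) := by
  intro n
  induction n with
  | zero => intro s; simp
  | succ n ih =>
    intro s
    rw [List.range'_succ, List.takeWhile_cons]
    by_cases hs : (s : Int) ≤ ml
    · have h1 : min (n + 1) ((ml - (s : Int) + 1).toNat) = (min n ((ml - (s + 1 : Nat) + 1).toNat)) + 1 := by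
        push_cast; omega
      rw [h1, List.range'_succ]
      simp only [hs, decide_true, if_true, ih (s + 1)]
    · have h0 : min (n + 1) ((ml - (s : Int) + 1).toNat) = 0 := by omega
      simp [hs, h0]

-- The fuel counter does not matter as long as it exceeds the length.
lemma cutAllFuel_mono :
    ∀ (f f' : Nat) (cs : List Char) (dict : List (String × Int)) (ml : Int),
      cs.length < f → cs.length < f' → CutAllFuel f cs dict ml = CutAllFuel f' cs dict ml := by
  intro f
  induction f with
  | zero => intro f' cs dict ml hf; omega
  | succ f ih =>
    intro f' cs dict ml hf hf'
    cases f' with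
    | zero => omega
    | succ f' =>
      rw [CutAllFuel, CutAllFuel]
      by_cases h0 : cs.length = 0
      · rw [if_pos h0, if_pos h0]
      · rw [if_neg h0, if_neg h0]
        apply PySem.List.foldl_congr_mem
        intro acc i hi
        have hmem : i ∈ List.range' 1 cs.length := (List.takeWhile_sublist _).mem hi
        have hrange : 1 ≤ i ∧ i < 1 + cs.length := by
          constructor
          · exact (List.mem_range'_1.mp hmem).1
          · exact (List.mem_range'_1.mp hmem).2
        simp only []
        rw [ih f' (cs.drop i) dict ml (by simp only [List.length_drop]; omega) (by simp only [List.length_drop]; omega)]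

-- A fold whose every step fixes the accumulator does nothing.
lemma foldl_fixed {α β : Type} (f : β → α → β) (l : List α)
    (h : ∀ acc x, x ∈ l → f acc x = acc) : ∀ acc, l.foldl f acc = acc := by
  induction l with
  | nil => intro acc; rfl
  | cons a l ih =>
    intro acc
    rw [List.foldl_cons, h acc a (by simp)]
    exact ih (fun acc x hx => h acc x (by simp [hx])) acc

-- A's loop step does nothing at an index longer than every dictionary key.
lemma astep_inactive (cs : List Char) (dict : List (String × Int)) (ml : Int) (fuel : Nat) (i : Nat)
    (hlong : CutAllLongest dict < (i : Int)) (hile : i ≤ cs.length) :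
    ∀ acc : List (List String),
      (fun (target : List (List String)) (i : Nat) =>
        let words := String.mk (cs.take i)
        if dict.any (fun p => p.1 == words) then
          let rs := CutAllFuel fuel (cs.drop i) dict ml
          if rs.length ≠ 0 then target ++ rs.map (fun r => words :: r)
          else target ++ [[words]]
        else target) acc i = acc := by
  intro acc
  have hany : dict.any (fun p => p.1 == String.mk (cs.take i)) = false := by
    rw [List.any_eq_false]
    intro p hp hbeq
    have hpe : p.1 = String.mk (cs.take i) := eq_of_beq hbeq
    have htol : (String.mk (cs.take i)).toList = cs.take i := Eq.symm (String.ofList_eq.mp rfl)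
    have hlen : p.1.toList.length = i := by
      rw [hpe, htol, List.length_take]
      omega
    have hb := (PySem.List.le_foldl_max (dict.map (fun p => ((p.1.toList.length : Int)))) 0).2
      ((p.1.toList.length : Int)) (List.mem_map_of_mem hp)
    unfold CutAllLongest at hlong
    omega
  simp [hany]

-- B's table holds exactly A's results on all suffixes.
lemma cutAllTbl_spec (dict : List (String × Int)) (ml : Int) :
    ∀ cs : List Char,
      CutAllTbl cs dict ml (CutAllLongest dict)
        = (List.range (cs.length + 1)).map
            (fun j => CutAllFuel (cs.length - j + 1) (cs.drop j) dict ml) := by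
  intro cs
  induction cs with
  | nil =>
    rw [CutAllTbl]
    simp [CutAllFuel]
  | cons c rest ih =>
    have hrow : CutAllRow (c :: rest) (CutAllTbl rest dict ml (CutAllLongest dict)) dict ml (CutAllLongest dict)
        = CutAllFuel ((c :: rest).length + 1) (c :: rest) dict ml := by
      have htbl : ∀ i, 1 ≤ i → i ≤ (c :: rest).length →
          (CutAllTbl rest dict ml (CutAllLongest dict)).getD (i - 1) []
            = CutAllFuel ((c :: rest).length - i + 1) ((c :: rest).drop i) dict ml := by
        intro i h1 h2
        rw [ih]
        have hlt : i - 1 < (List.map (fun j => CutAllFuel (rest.length - j + 1) (List.drop j rest) dict ml) (List.range (rest.length + 1))).length := by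
          simp; simp at h2; omega
        rw [List.getD_eq_getElem _ _ hlt]
        simp only [List.getElem_map, List.getElem_range]
        have hdrop : (c :: rest).drop i = rest.drop (i - 1) := by
          cases i with
          | zero => omega
          | succ k => simp
        have hfuel : rest.length - (i - 1) + 1 = (c :: rest).length - i + 1 := by
          simp; omega
        rw [hdrop, hfuel]
      rw [CutAllRow, CutAllFuel,
        if_neg (show ¬((c :: rest).length = 0) by simp),
        takeWhile_range'_le ml (c :: rest).length 1]
      have hcount : min ((c :: rest).length) ((ml - (1 : Nat) + 1).toNat)
          = (min (((c :: rest).length : Int)) ml).toNat := by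
        push_cast; omega
      rw [hcount]
      -- split A's scan at kB = min(len, ml, longest); the tail beyond the longest key is inert
      have hkb_le : (min (min (((c :: rest).length : Int)) ml) (CutAllLongest dict)).toNat
          ≤ (min (((c :: rest).length : Int)) ml).toNat := by omega
      have hsum : (min (min (((c :: rest).length : Int)) ml) (CutAllLongest dict)).toNat
          + ((min (((c :: rest).length : Int)) ml).toNat
            - (min (min (((c :: rest).length : Int)) ml) (CutAllLongest dict)).toNat)
          = (min (((c :: rest).length : Int)) ml).toNat := by omega
      have hsplit : List.range' 1 ((min (((c :: rest).length : Int)) ml).toNat)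
          = List.range' 1 ((min (min (((c :: rest).length : Int)) ml) (CutAllLongest dict)).toNat)
            ++ List.range' (1 + (min (min (((c :: rest).length : Int)) ml) (CutAllLongest dict)).toNat)
              ((min (((c :: rest).length : Int)) ml).toNat
                - (min (min (((c :: rest).length : Int)) ml) (CutAllLongest dict)).toNat) := by
        have h := List.range'_append (s := 1)
          (m := (min (min (((c :: rest).length : Int)) ml) (CutAllLongest dict)).toNat)
          (n := (min (((c :: rest).length : Int)) ml).toNat
            - (min (min (((c :: rest).length : Int)) ml) (CutAllLongest dict)).toNat) (step := 1)
        rw [one_mul, hsum] at h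
        exact h.symm
      rw [hsplit, List.foldl_append]
      symm
      rw [foldl_fixed _ _ (by
        intro acc i hi
        have hm := List.mem_range'_1.mp hi
        exact astep_inactive (c :: rest) dict ml (c :: rest).length i (by omega) (by omega) acc)]
      apply PySem.List.foldl_congr_mem
      intro acc i hi
      have hrange := List.mem_range'_1.mp hi
      have hile : i ≤ (c :: rest).length := by omega
      simp only [CutAllStep]
      rw [htbl i hrange.1 hile]
      rw [cutAllFuel_mono ((c :: rest).length - i + 1) ((c :: rest).length)
        ((c :: rest).drop i) dict ml (by simp only [List.length_drop]; omega)
        (by simp only [List.length_drop, List.length_cons]; omega)]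
    rw [CutAllTbl]
    rw [hrow, ih]
    have hr : List.range ((c :: rest).length + 1)
        = 0 :: (List.range (rest.length + 1)).map (· + 1) := by
      simp [List.range_succ_eq_map]
    rw [hr]
    simp [Nat.succ_sub_succ]

-- ===== VERDICT (by name: the statement is the Claim_ definition above) =====
theorem CutAll_spec : Claim_equal_CutAll := by
  intro sentence dict max_length _
  unfold Spec_CutAll CutAll CutAll_alt
  rw [cutAllTbl_spec]
  rw [List.range_succ_eq_map]
  simp
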